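-- pv_equiv track=rewrite | github.com/andrew-gatts/ELEC-3225 | bombe/test-bombe.py | encrypt_with_stepping
-- ===== SOURCE A (Python) =====
-- def encrypt_with_stepping(plaintext: str, offsets: tuple[int, ...]) -> str:
--     """
--     Mirror of your decrypt_message stepping:
--     - step BEFORE each character
--     - then run FORWARD through rotors applying +offset (Caesar)
--     Plugboard is omitted (use {} in tests) to keep this deterministic.
--     """
--     local = [o % 26 for o in offsets]  # do not mutate objects under test
--
--     def step():
--         # rightmost rotor steps every char; carry left on wrap
--         for i in range(len(local) - 1, -1, -1):
--             local[i] = (local[i] + 1) % 26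
--             if local[i] != 0:
--                 break
--
--     out = []
--     for ch in plaintext.lower():
--         if 'a' <= ch <= 'z':
--             step()
--             x = ord(ch) - 97
--             # forward through rotors (encryption): +offset for each rotor
--             for off in local:
--                 x = (x + off) % 26
--             out.append(chr(97 + x))
--         else:
--             out.append(ch)
--     return ''.join(out)
-- ===== SOURCE B (Python) =====
-- def encrypt_with_stepping(plaintext: str, offsets: tuple[int, ...]) -> str:
--     """Different algorithm: the rotor bank is a base-26 odometer, i.e. just the
--     integer N encoded by the offsets.  After the step before the t-th letter the
--     rotor state is (N + t) mod 26**k, and the Caesar shift is the digit sum of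
--     that number in base 26 — so no rotor list is kept or stepped at all."""
--     n = 0
--     for o in offsets:
--         n = n * 26 + (o % 26)
--     big = 26 ** len(offsets)
--     out = []
--     t = 0
--     for ch in plaintext.lower():
--         if 'a' <= ch <= 'z':
--             t += 1
--             m = (n + t) % big
--             s = 0
--             while m > 0:
--                 s += m % 26
--                 m //= 26
--             out.append(chr(97 + (ord(ch) - 97 + s) % 26))
--         else:
--             out.append(ch)
--     return ''.join(out)
-- ===== Notes on version B (the rewrite author's own statement) =====
-- stated objective: alternative
-- what changed: B eliminates the rotor list and the stepping entirely: the offsets are packed into one base-26 integer N, the odometer state before the t-th letter is the closed form (N+t) mod 26^k, and the shift is that number's base-26 digit sum; it trades the per-character rotor-list walk for big-integer digit extraction, which is slower when the rotor count k is very large.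
import Mathlib
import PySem

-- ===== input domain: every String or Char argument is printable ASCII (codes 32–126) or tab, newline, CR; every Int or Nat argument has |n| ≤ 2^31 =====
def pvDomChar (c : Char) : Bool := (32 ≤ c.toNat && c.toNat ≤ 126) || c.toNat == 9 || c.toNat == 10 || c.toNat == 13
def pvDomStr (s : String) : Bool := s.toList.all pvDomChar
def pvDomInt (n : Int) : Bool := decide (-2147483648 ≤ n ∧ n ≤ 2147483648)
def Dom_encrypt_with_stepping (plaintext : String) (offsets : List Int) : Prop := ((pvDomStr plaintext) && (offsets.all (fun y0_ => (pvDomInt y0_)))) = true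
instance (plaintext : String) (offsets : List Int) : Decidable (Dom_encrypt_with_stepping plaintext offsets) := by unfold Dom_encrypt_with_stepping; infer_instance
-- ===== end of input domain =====

-- B replaces the stepped rotor list by arithmetic on the base-26 odometer integer:
-- the shift for the t-th letter is the base-26 digit sum of (N + t) mod 26^k.

-- ===== PORT A =====
-- A's step(): 'for i in range(len(local)-1, -1, -1): local[i]=(local[i]+1)%26; if !=0: break',
-- ported on the reversed list (the loop walks the list right-to-left and breaks).
def stepRevA : List Int → List Int
  | [] => []
  | x :: xs =>
    let x' := PySem.Int.mod (x + 1) 26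
    if x' ≠ 0 then x' :: xs else x' :: stepRevA xs

def encA_go : List Char → List Int → List Char → List Char
  | [], _, out => out
  | ch :: rest, loc, out =>
    if 'a' ≤ ch ∧ ch ≤ 'z' then
      let loc' := (stepRevA loc.reverse).reverse
      let x : Int := (ch.toNat : Int) - 97
      let x' := loc'.foldl (fun a off => PySem.Int.mod (a + off) 26) x
      encA_go rest loc' (out ++ [Char.ofNat (97 + x').toNat])
    else
      encA_go rest loc (out ++ [ch])

def encrypt_with_stepping (plaintext : String) (offsets : List Int) : String :=
  let loc := offsets.map (fun o => PySem.Int.mod o 26)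
  String.ofList (encA_go (PySem.Str.lower plaintext).toList loc [])

-- ===== PORT B =====
-- B's 'while m > 0: s += m % 26; m //= 26' digit-sum loop; m only ever holds a
-- Python '%'-result of a positive modulus, so 0 ≤ m and the loop terminates.
def b_digitsum (m s : Int) : Int :=
  if h : 0 < m then b_digitsum (PySem.Int.floordiv m 26) (s + PySem.Int.mod m 26) else s
  termination_by m.toNat
  decreasing_by
    rw [PySem.Int.floordiv_eq_ediv_of_pos (by norm_num : (0:Int) < 26)]
    omega

def encB_go : List Char → Int → Int → Int → List Char → List Char
  | [], _, _, _, out => out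
  | ch :: rest, n, big, t, out =>
    if 'a' ≤ ch ∧ ch ≤ 'z' then
      let t' := t + 1
      let s := b_digitsum (PySem.Int.mod (n + t') big) 0
      encB_go rest n big t' (out ++ [Char.ofNat (97 + PySem.Int.mod ((ch.toNat : Int) - 97 + s) 26).toNat])
    else
      encB_go rest n big t (out ++ [ch])

def encrypt_with_stepping_alt (plaintext : String) (offsets : List Int) : String :=
  let n := offsets.foldl (fun n o => n * 26 + PySem.Int.mod o 26) 0
  let big : Int := 26 ^ offsets.length
  String.ofList (encB_go (PySem.Str.lower plaintext).toList n big 0 [])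

-- ===== PRECONDITION & SPEC =====
def Spec_encrypt_with_stepping (plaintext : String) (offsets : List Int) (out : String) : Prop := out = encrypt_with_stepping_alt plaintext offsets
instance (plaintext : String) (offsets : List Int) (out : String) : Decidable (Spec_encrypt_with_stepping plaintext offsets out) := by unfold Spec_encrypt_with_stepping; infer_instance

-- ===== CLAIM (what is proved, stated in full; the proofs are below) =====
def Claim_equal_encrypt_with_stepping : Prop := ∀ (plaintext : String) (offsets : List Int), Dom_encrypt_with_stepping plaintext offsets → Spec_encrypt_with_stepping plaintext offsets (encrypt_with_stepping plaintext offsets)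

-- ===== LEMMAS AND PROOFS =====

def allDigits (l : List Int) : Prop := ∀ x ∈ l, 0 ≤ x ∧ x < 26

-- little-endian base-26 value of a digit list
def valLE : List Int → Int
  | [] => 0
  | d :: ds => d + 26 * valLE ds

lemma mod26_eq_emod (a : Int) : PySem.Int.mod a 26 = a % 26 :=
  PySem.Int.mod_eq_emod_of_pos (a := a) (by norm_num)

lemma allDigits_reverse {l : List Int} (h : allDigits l) : allDigits l.reverse := by
  intro x hx; exact h x (List.mem_reverse.mp hx)

lemma allDigits_stepRevA {l : List Int} (h : allDigits l) : allDigits (stepRevA l) := by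
  induction l with
  | nil => simpa [stepRevA] using h
  | cons x xs ih =>
    have hxs : allDigits xs := fun y hy => h y (by simp [hy])
    have hmodr : 0 ≤ PySem.Int.mod (x + 1) 26 ∧ PySem.Int.mod (x + 1) 26 < 26 := by
      rw [mod26_eq_emod]; omega
    simp only [stepRevA]
    split <;>
    · intro y hy
      rcases List.mem_cons.mp hy with rfl | hy'
      · exact hmodr
      · first | exact hxs y hy' | exact ih hxs y hy'

lemma length_stepRevA (l : List Int) : (stepRevA l).length = l.length := by
  induction l with
  | nil => rfl
  | cons x xs ih => simp only [stepRevA]; split <;> simp [ih]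

lemma valLE_bounds {l : List Int} (h : allDigits l) :
    0 ≤ valLE l ∧ valLE l < 26 ^ l.length := by
  induction l with
  | nil => simp [valLE]
  | cons d ds ih =>
    have hd := h d (by simp)
    have hds : allDigits ds := fun y hy => h y (by simp [hy])
    obtain ⟨h1, h2⟩ := ih hds
    have hp : (26:Int) ^ (d :: ds).length = 26 * 26 ^ ds.length := by
      rw [List.length_cons, pow_succ]; ring
    constructor
    · simp only [valLE]; omega
    · simp only [valLE]; rw [hp]; omega

lemma sum_eq_zero_of_valLE_zero {l : List Int} (h : allDigits l) (hv : valLE l = 0) :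
    l.sum = 0 := by
  induction l with
  | nil => rfl
  | cons d ds ih =>
    have hd := h d (by simp)
    have hds : allDigits ds := fun y hy => h y (by simp [hy])
    have hnn := (valLE_bounds hds).1
    simp only [valLE] at hv
    have hd0 : d = 0 ∧ valLE ds = 0 := by omega
    simp [List.sum_cons, hd0.1, ih hds hd0.2]

-- B's digit-sum loop computes the sum of the digits
lemma digitsum_valLE (l : List Int) (s : Int) (h : allDigits l) :
    b_digitsum (valLE l) s = s + l.sum := by
  induction l generalizing s with
  | nil => rw [b_digitsum]; simp [valLE]
  | cons d ds ih =>
    have hd := h d (by simp)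
    have hds : allDigits ds := fun y hy => h y (by simp [hy])
    have hnn := (valLE_bounds hds).1
    rw [show valLE (d :: ds) = d + 26 * valLE ds from rfl]
    by_cases hz : d + 26 * valLE ds = 0
    · have hd0 : d = 0 ∧ valLE ds = 0 := by omega
      rw [b_digitsum, dif_neg (by omega)]
      simp [List.sum_cons, hd0.1, sum_eq_zero_of_valLE_zero hds hd0.2]
    · have hpos : 0 < d + 26 * valLE ds := by omega
      have hm : PySem.Int.mod (d + 26 * valLE ds) 26 = d := by
        rw [mod26_eq_emod]; omega
      have hq : PySem.Int.floordiv (d + 26 * valLE ds) 26 = valLE ds := by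
        rw [PySem.Int.floordiv_eq_ediv_of_pos (by norm_num : (0:Int) < 26)]; omega
      rw [b_digitsum, dif_pos hpos, hm, hq, ih _ hds]
      simp only [List.sum_cons]
      ring

-- A's odometer step is '+1 mod 26^k' on the little-endian value
lemma stepRevA_val {l : List Int} (h : allDigits l) :
    valLE (stepRevA l) = (valLE l + 1) % 26 ^ l.length := by
  induction l with
  | nil => simp [stepRevA, valLE]
  | cons x xs ih =>
    have hx := h x (by simp)
    have hxs : allDigits xs := fun y hy => h y (by simp [hy])
    obtain ⟨hv0, hvlt⟩ := valLE_bounds hxs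
    have hxval : PySem.Int.mod (x + 1) 26 = if x = 25 then 0 else x + 1 := by
      rw [mod26_eq_emod]; split_ifs with h25 <;> omega
    have hp : (26:Int) ^ (x :: xs).length = 26 * 26 ^ xs.length := by
      rw [List.length_cons, pow_succ]; ring
    by_cases h25 : x = 25
    · subst h25
      have hz : PySem.Int.mod (25 + 1 : Int) 26 = 0 := by rw [hxval]; simp
      simp only [stepRevA, hz, ne_eq, not_true_eq_false, if_false, valLE]
      rw [ih hxs, hp]
      have hmm : (26:Int) * (valLE xs + 1) % (26 * 26 ^ xs.length)
          = 26 * ((valLE xs + 1) % 26 ^ xs.length) := by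
        have h26 : (0:Int) < 26 := by norm_num
        exact Int.mul_emod_mul_of_pos _ _ h26
      have : (25 + 26 * valLE xs + 1 : Int) = 26 * (valLE xs + 1) := by ring
      rw [this, hmm]
      omega
    · have hne : (x + 1 : Int) ≠ 0 := by omega
      simp only [stepRevA, hxval, if_neg h25, ne_eq, hne, not_false_eq_true, if_true, valLE]
      rw [hp]
      have hmod : (x + 1 + 26 * valLE xs) % (26 * 26 ^ xs.length) = x + 1 + 26 * valLE xs :=
        Int.emod_eq_of_lt (by omega) (by omega)
      rw [show (x + 26 * valLE xs + 1 : Int) = x + 1 + 26 * valLE xs by ring, hmod]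

-- A's inner rotor loop is addition of the rotor sum, mod 26
lemma fold_mod (l : List Int) (x : Int) (hx : 0 ≤ x ∧ x < 26) :
    l.foldl (fun a off => PySem.Int.mod (a + off) 26) x = PySem.Int.mod (x + l.sum) 26 := by
  induction l generalizing x with
  | nil => simp only [List.foldl_nil, List.sum_nil, add_zero, mod26_eq_emod]; omega
  | cons o os ih =>
    simp only [List.foldl_cons, List.sum_cons]
    rw [ih _ (by rw [mod26_eq_emod]; omega)]
    simp only [mod26_eq_emod]
    omega

lemma valLE_append_singleton (xs : List Int) (d : Int) :
    valLE (xs ++ [d]) = valLE xs + 26 ^ xs.length * d := by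
  induction xs with
  | nil => simp [valLE]
  | cons y ys ih =>
    simp only [List.cons_append, valLE, ih, List.length_cons, pow_succ]
    ring

-- B's initial fold over offsets builds the little-endian value of the reversed digit list
lemma fold_val (l : List Int) (acc : Int) :
    l.foldl (fun n o => n * 26 + PySem.Int.mod o 26) acc
      = acc * 26 ^ l.length + valLE ((l.map (fun o => PySem.Int.mod o 26)).reverse) := by
  induction l generalizing acc with
  | nil => simp [valLE]
  | cons o os ih =>
    simp only [List.foldl_cons, List.map_cons, List.reverse_cons, ih,
      valLE_append_singleton, List.length_reverse, List.length_map, List.length_cons,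
      pow_succ]
    ring

-- main loop invariant: the PySem-mod of (n + t) by 26^k is the rotor state's value
lemma go_eq (chs : List Char) (loc : List Int) (n t : Int) (out : List Char)
    (hd : allDigits loc)
    (hinv : (n + t) % 26 ^ loc.length = valLE loc.reverse) :
    encA_go chs loc out = encB_go chs n (26 ^ loc.length) t out := by
  induction chs generalizing loc t out with
  | nil => simp [encA_go, encB_go]
  | cons ch rest ih =>
    simp only [encA_go, encB_go]
    by_cases hab : 'a' ≤ ch ∧ ch ≤ 'z'
    · simp only [if_pos hab]
      have hch : 97 ≤ ch.toNat ∧ ch.toNat ≤ 122 := ⟨hab.1, hab.2⟩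
      have hx : 0 ≤ (ch.toNat : Int) - 97 ∧ (ch.toNat : Int) - 97 < 26 := by
        obtain ⟨h1, h2⟩ := hch; omega
      have hrev : allDigits loc.reverse := allDigits_reverse hd
      set loc' := (stepRevA loc.reverse).reverse with hloc'
      have hd' : allDigits loc' := allDigits_reverse (allDigits_stepRevA hrev)
      have hlen : loc'.length = loc.length := by
        rw [hloc', List.length_reverse, length_stepRevA, List.length_reverse]
      have hpow : (0:Int) < 26 ^ loc.length := pow_pos (by norm_num) _
      -- new invariant value
      have hval' : valLE loc'.reverse = (n + (t + 1)) % 26 ^ loc.length := by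
        rw [hloc', List.reverse_reverse, stepRevA_val hrev, List.length_reverse, ← hinv,
          Int.emod_add_emod]
        ring_nf
      -- B's shift equals loc'.sum
      have hmodbig : PySem.Int.mod (n + (t + 1)) (26 ^ loc.length) = (n + (t + 1)) % 26 ^ loc.length :=
        PySem.Int.mod_eq_emod_of_pos hpow
      have hs : b_digitsum (PySem.Int.mod (n + (t + 1)) (26 ^ loc.length)) 0 = loc'.sum := by
        rw [hmodbig, ← hval', digitsum_valLE _ _ (allDigits_reverse hd'), List.sum_reverse,
          zero_add]
      have hfold : loc'.foldl (fun a off => PySem.Int.mod (a + off) 26) ((ch.toNat : Int) - 97)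
          = PySem.Int.mod ((ch.toNat : Int) - 97 + loc'.sum) 26 := fold_mod _ _ hx
      rw [hfold, hs] at *
      have := ih loc' (t + 1)
        (out ++ [Char.ofNat (97 + PySem.Int.mod ((ch.toNat : Int) - 97 + loc'.sum) 26).toNat])
        hd' (by rw [hlen, hval'])
      rw [hlen] at this
      exact this
    · simp only [if_neg hab]
      exact ih loc t (out ++ [ch]) hd hinv

-- ===== VERDICT (by name: the statement is the Claim_ definition above) =====
theorem encrypt_with_stepping_spec : Claim_equal_encrypt_with_stepping := by
  intro plaintext offsets _
  unfold Spec_encrypt_with_stepping encrypt_with_stepping encrypt_with_stepping_alt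
  dsimp only
  apply congrArg
  have hd : allDigits (offsets.map (fun o => PySem.Int.mod o 26)) := by
    intro x hx
    rcases List.mem_map.mp hx with ⟨o, _, rfl⟩
    rw [mod26_eq_emod]; omega
  have hlen : (offsets.map (fun o => PySem.Int.mod o 26)).length = offsets.length :=
    List.length_map ..
  have hn : offsets.foldl (fun n o => n * 26 + PySem.Int.mod o 26) 0
      = valLE ((offsets.map (fun o => PySem.Int.mod o 26)).reverse) := by
    rw [fold_val]; ring
  have hb := valLE_bounds (allDigits_reverse hd)
  rw [List.length_reverse, hlen] at hb
  have hinv : (offsets.foldl (fun n o => n * 26 + PySem.Int.mod o 26) 0 + 0)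
      % 26 ^ (offsets.map (fun o => PySem.Int.mod o 26)).length
      = valLE ((offsets.map (fun o => PySem.Int.mod o 26)).reverse) := by
    rw [add_zero, hn, hlen]
    exact Int.emod_eq_of_lt (hn ▸ hb.1) (hn ▸ hb.2)
  have := go_eq (PySem.Str.lower plaintext).toList (offsets.map (fun o => PySem.Int.mod o 26))
    (offsets.foldl (fun n o => n * 26 + PySem.Int.mod o 26) 0) 0 [] hd hinv
  rw [hlen] at this
  exact this
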